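-- pv_equiv track=rewrite | github.com/genaimavericks/arc | api/kgdatainsights/linguistic_checker.py | _get_improvement_suggestions
-- ===== SOURCE A (Python) =====
-- from typing import Dict, List, Any, Optional, Tuple
--
-- def _get_improvement_suggestions(errors: List[Dict[str, Any]]) -> List[str]:
--     """Generate general improvement suggestions based on errors"""
--     suggestions = []
--
--     # Grammar suggestions
--     if any(e.get("category") == "grammar" for e in errors):
--         suggestions.append("Review grammar structure")
--
--     # Spelling suggestions
--     if any(e.get("category") == "misspelling" for e in errors):
--         suggestions.append("Check spelling")
--
--     # Style suggestions
--     if any(e.get("category") == "style" for e in errors):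
--         suggestions.append("Consider more concise phrasing")
--
--     # Punctuation suggestions
--     if any(e.get("rule_id", "").startswith("PUNCTUATION") for e in errors):
--         suggestions.append("Review punctuation")
--
--     return suggestions or ["No specific suggestions"]
-- ===== SOURCE B (Python) =====
-- from typing import Dict, List, Any, Optional, Tuple
--
-- def _get_improvement_suggestions(errors: List[Dict[str, Any]]) -> List[str]:
--     """Generate general improvement suggestions based on errors (single pass over errors)."""
--     has_grammar = has_spelling = has_style = has_punct = False
--     for e in errors:
--         c = e.get("category")
--         if c == "grammar":
--             has_grammar = True
--         elif c == "misspelling":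
--             has_spelling = True
--         elif c == "style":
--             has_style = True
--         if e.get("rule_id", "").startswith("PUNCTUATION"):
--             has_punct = True
--     suggestions = []
--     if has_grammar:
--         suggestions.append("Review grammar structure")
--     if has_spelling:
--         suggestions.append("Check spelling")
--     if has_style:
--         suggestions.append("Consider more concise phrasing")
--     if has_punct:
--         suggestions.append("Review punctuation")
--     return suggestions or ["No specific suggestions"]
-- ===== Notes on version B (the rewrite author's own statement) =====
-- stated objective: alternative
-- what changed: A makes four separate any() scans over errors; B does a single pass maintaining four boolean flags and assembles the suggestion list afterwards.
import Mathlib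
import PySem

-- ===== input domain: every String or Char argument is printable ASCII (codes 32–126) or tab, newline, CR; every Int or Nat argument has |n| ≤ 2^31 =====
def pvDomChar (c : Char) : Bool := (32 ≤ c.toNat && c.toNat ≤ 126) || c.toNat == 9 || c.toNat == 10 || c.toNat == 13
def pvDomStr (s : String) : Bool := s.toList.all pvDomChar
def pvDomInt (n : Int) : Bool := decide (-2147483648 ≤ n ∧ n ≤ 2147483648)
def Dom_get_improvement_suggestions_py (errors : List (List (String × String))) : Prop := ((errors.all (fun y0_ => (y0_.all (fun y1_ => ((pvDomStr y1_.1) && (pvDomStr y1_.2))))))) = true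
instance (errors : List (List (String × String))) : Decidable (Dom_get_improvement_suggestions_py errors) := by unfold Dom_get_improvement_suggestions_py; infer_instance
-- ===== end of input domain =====

-- ===== PORT A =====
-- One honest line: B replaces A's four any()-scans over errors by a single pass keeping four boolean flags (alternative decomposition, same cost class).
def get_improvement_suggestions_py (errors : List (List (String × String))) : List String :=
  let suggestions : List String := []
  let suggestions := if errors.any (fun e => (PySem.Dict.mk e).get? "category" == some "grammar")
    then suggestions ++ ["Review grammar structure"] else suggestions
  let suggestions := if errors.any (fun e => (PySem.Dict.mk e).get? "category" == some "misspelling")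
    then suggestions ++ ["Check spelling"] else suggestions
  let suggestions := if errors.any (fun e => (PySem.Dict.mk e).get? "category" == some "style")
    then suggestions ++ ["Consider more concise phrasing"] else suggestions
  let suggestions := if errors.any (fun e => PySem.Str.startswith ((PySem.Dict.mk e).getD "rule_id" "") "PUNCTUATION")
    then suggestions ++ ["Review punctuation"] else suggestions
  if suggestions = [] then ["No specific suggestions"] else suggestions

-- ===== PORT B =====
-- single pass: the loop body of Source B (if/elif on category, separate rule_id check)
def pvStepB (q : Bool × Bool × Bool × Bool) (e : List (String × String)) : Bool × Bool × Bool × Bool :=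
  let c := (PySem.Dict.mk e).get? "category"
  let q := if c == some "grammar" then (true, q.2.1, q.2.2.1, q.2.2.2)
    else if c == some "misspelling" then (q.1, true, q.2.2.1, q.2.2.2)
    else if c == some "style" then (q.1, q.2.1, true, q.2.2.2)
    else q
  if PySem.Str.startswith ((PySem.Dict.mk e).getD "rule_id" "") "PUNCTUATION"
    then (q.1, q.2.1, q.2.2.1, true) else q

def get_improvement_suggestions_py_alt (errors : List (List (String × String))) : List String :=
  let q := errors.foldl pvStepB (false, false, false, false)
  let suggestions : List String :=
    (if q.1 then ["Review grammar structure"] else []) ++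
    (if q.2.1 then ["Check spelling"] else []) ++
    (if q.2.2.1 then ["Consider more concise phrasing"] else []) ++
    (if q.2.2.2 then ["Review punctuation"] else [])
  if suggestions = [] then ["No specific suggestions"] else suggestions

-- ===== PRECONDITION & SPEC =====
def Spec_get_improvement_suggestions_py (errors : List (List (String × String))) (out : List String) : Prop := out = get_improvement_suggestions_py_alt errors
instance (errors : List (List (String × String))) (out : List String) : Decidable (Spec_get_improvement_suggestions_py errors out) := by unfold Spec_get_improvement_suggestions_py; infer_instance

-- ===== CLAIM =====
def Claim_equal_get_improvement_suggestions_py : Prop := ∀ (errors : List (List (String × String))), Dom_get_improvement_suggestions_py errors → Spec_get_improvement_suggestions_py errors (get_improvement_suggestions_py errors)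

-- ===== LEMMAS AND PROOFS =====
def pvPg (e : List (String × String)) : Bool := (PySem.Dict.mk e).get? "category" == some "grammar"
def pvPm (e : List (String × String)) : Bool := (PySem.Dict.mk e).get? "category" == some "misspelling"
def pvPs (e : List (String × String)) : Bool := (PySem.Dict.mk e).get? "category" == some "style"
def pvPp (e : List (String × String)) : Bool := PySem.Str.startswith ((PySem.Dict.mk e).getD "rule_id" "") "PUNCTUATION"

theorem pvStepB_eq (q : Bool × Bool × Bool × Bool) (e : List (String × String)) :
    pvStepB q e = (q.1 || pvPg e, q.2.1 || pvPm e, q.2.2.1 || pvPs e, q.2.2.2 || pvPp e) := by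
  unfold pvStepB pvPg pvPm pvPs pvPp
  obtain ⟨a, b, c, d⟩ := q
  by_cases hg : (PySem.Dict.mk e).get? "category" == some "grammar" <;>
  by_cases hm : (PySem.Dict.mk e).get? "category" == some "misspelling" <;>
  by_cases hs : (PySem.Dict.mk e).get? "category" == some "style" <;>
  by_cases hp : PySem.Str.startswith ((PySem.Dict.mk e).getD "rule_id" "") "PUNCTUATION" <;>
    simp_all

theorem pvFoldB (errors : List (List (String × String))) (q : Bool × Bool × Bool × Bool) :
    errors.foldl pvStepB q =
      (q.1 || errors.any pvPg, q.2.1 || errors.any pvPm, q.2.2.1 || errors.any pvPs, q.2.2.2 || errors.any pvPp) := by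
  induction errors generalizing q with
  | nil => simp
  | cons e es ih =>
    simp only [List.foldl_cons, List.any_cons, ih, pvStepB_eq]
    simp [Bool.or_assoc]

-- ===== VERDICT =====
theorem get_improvement_suggestions_py_spec : Claim_equal_get_improvement_suggestions_py := by
  intro errors _
  unfold Spec_get_improvement_suggestions_py get_improvement_suggestions_py get_improvement_suggestions_py_alt
  rw [pvFoldB]
  simp only [Bool.false_or,
    show (fun e => (PySem.Dict.mk e).get? "category" == some "grammar") = pvPg from rfl,
    show (fun e => (PySem.Dict.mk e).get? "category" == some "misspelling") = pvPm from rfl,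
    show (fun e => (PySem.Dict.mk e).get? "category" == some "style") = pvPs from rfl,
    show (fun e => PySem.Str.startswith ((PySem.Dict.mk e).getD "rule_id" "") "PUNCTUATION") = pvPp from rfl]
  cases errors.any pvPg <;> cases errors.any pvPm <;>
    cases errors.any pvPs <;> cases errors.any pvPp <;> rfl
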